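-- pv_equiv track=rewrite | github.com/LukeDerpwalka/42_testers | so_long_map_tester.py | is_valid_map
-- ===== SOURCE A (Python) =====
-- def is_valid_map(map_content):
-- 	valid_cells = {'E', '1', '0', 'C', 'P'}
--
-- 	# Check for rectangular shape
-- 	row_lengths = set(len(line) for line in map_content)
-- 	if len(row_lengths) != 1:
-- 		return False, f"Map is not rectangular. Row lengths: {row_lengths}"
--
-- 	# Check surrounded by walls
-- 	if not all(cell == '1' for cell in map_content[0] + map_content[-1]) or not all(line[0] == '1' and line[-1] == '1' for line in map_content):
-- 		return False, "Map is not surrounded by walls"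
--
-- 	start = None
-- 	exit = None
-- 	collectibles = []
--
-- 	# Check for empty lines at the beginning
-- 	empty_lines_beginning = 0
-- 	for line in map_content:
-- 		if line.strip() == "":
-- 			empty_lines_beginning += 1
-- 		else:
-- 			break
--
-- 	if empty_lines_beginning > 0:
-- 		return False, f"Map has {empty_lines_beginning} empty line(s) at the beginning"
--
-- 	# Check for empty lines in the middle
-- 	empty_lines_middle = False
-- 	for line in map_content[1:-1]:
-- 		if line.strip() == "":
-- 			empty_lines_middle = True
-- 			break
--
-- 	if empty_lines_middle:
-- 		return False, "Map has empty line(s) in the middle"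
--
-- 	for i, line in enumerate(map_content):
-- 		for j, cell in enumerate(line):
-- 			if cell not in valid_cells:
-- 				return False, f"Invalid cell '{cell}' found at position ({i}, {j})"
--
-- 			if cell == 'P':
-- 				if start is not None:
-- 					return False, "More than one player ('P')"
-- 				start = (i, j)
-- 			elif cell == 'E':
-- 				if exit is not None:
-- 					return False, "More than one exit ('E')"
-- 				exit = (i, j)
-- 			elif cell == 'C':
-- 				collectibles.append((i, j))
--
-- 	if start is None:
-- 		return False, "Map missing player's starting position"
-- 	if exit is None:
-- 		return False, "Map missing exit"
-- 	if not collectibles: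
-- 		return False, "Map missing collectibles"
--
-- 	# Check path from start to exit and collectibles
-- 	visited = set()
-- 	stack = [start]
--
-- 	while stack:
-- 		i, j = stack.pop()
-- 		if (i, j) in visited:
-- 			continue
-- 		visited.add((i, j))
--
-- 		for x, y in ((i+1, j), (i-1, j), (i, j+1), (i, j-1)):
-- 			if 0 <= x < len(map_content) and 0 <= y < len(map_content[0]) and map_content[x][y] in ('0', 'C', 'E', 'P'):
-- 				stack.append((x, y))
--
-- 	if exit not in visited:
-- 		return False, "No path from start to exit"
-- 	for c in collectibles:
-- 		if c not in visited:
-- 			return False, f"No path from start to collectible at {c}"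
--
-- 	if map_content[-1].strip() == "":
-- 		return False, "Empty line at the end of the map"
--
-- 	return True, "Valid map"
-- ===== SOURCE B (Python) =====
-- def is_valid_map(map_content):
--     valid_cells = {'E', '1', '0', 'C', 'P'}
--
--     row_lengths = set(len(line) for line in map_content)
--     if len(row_lengths) != 1:
--         return False, f"Map is not rectangular. Row lengths: {row_lengths}"
--
--     if not all(cell == '1' for cell in map_content[0] + map_content[-1]) or not all(line[0] == '1' and line[-1] == '1' for line in map_content):
--         return False, "Map is not surrounded by walls"
--
--     # Every line starts with the wall character '1', so no line is blank and the
--     # original's empty-line checks (beginning / middle / end) can never trigger.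
--
--     start = None
--     exit = None
--     collectibles = []
--     for i, line in enumerate(map_content):
--         for j, cell in enumerate(line):
--             if cell not in valid_cells:
--                 return False, f"Invalid cell '{cell}' found at position ({i}, {j})"
--             if cell == 'P':
--                 if start is not None:
--                     return False, "More than one player ('P')"
--                 start = (i, j)
--             elif cell == 'E':
--                 if exit is not None:
--                     return False, "More than one exit ('E')"
--                 exit = (i, j)
--             elif cell == 'C':
--                 collectibles.append((i, j))
--
--     if start is None:
--         return False, "Map missing player's starting position"
--     if exit is None:
--         return False, "Map missing exit"
--     if not collectibles:
--         return False, "Map missing collectibles"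
--
--     # Connected components of passable cells by merging component sets
--     # (union-find over explicit sets) instead of a stack-based flood fill.
--     rows, cols = len(map_content), len(map_content[0])
--     passable = ('0', 'C', 'E', 'P')
--     cells = [(i, j) for i, line in enumerate(map_content)
--                     for j, cell in enumerate(line) if cell in passable]
--     comps = [{c} for c in cells]
--     for (i, j) in cells:
--         for (x, y) in ((i, j + 1), (i + 1, j)):
--             if x < rows and y < cols and map_content[x][y] in passable:
--                 ca = next(s for s in comps if (i, j) in s)
--                 cb = next(s for s in comps if (x, y) in s)
--                 if ca is not cb:
--                     comps = [s for s in comps if s is not ca and s is not cb] + [ca | cb]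
--     start_comp = next(s for s in comps if start in s)
--
--     if exit not in start_comp:
--         return False, "No path from start to exit"
--     for c in collectibles:
--         if c not in start_comp:
--             return False, f"No path from start to collectible at {c}"
--
--     return True, "Valid map"
-- ===== Notes on version B (the rewrite author's own statement) =====
-- stated objective: alternative
-- what changed: The stack-based DFS flood fill is replaced by union-find-style merging of explicit component sets (one scan unioning each passable cell with its right/down passable neighbours, then membership tests against the start cell's component), and the three blank-line checks that the wall check makes unreachable are dropped; all other scans and the exact error strings/order are kept.
import Mathlib
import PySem

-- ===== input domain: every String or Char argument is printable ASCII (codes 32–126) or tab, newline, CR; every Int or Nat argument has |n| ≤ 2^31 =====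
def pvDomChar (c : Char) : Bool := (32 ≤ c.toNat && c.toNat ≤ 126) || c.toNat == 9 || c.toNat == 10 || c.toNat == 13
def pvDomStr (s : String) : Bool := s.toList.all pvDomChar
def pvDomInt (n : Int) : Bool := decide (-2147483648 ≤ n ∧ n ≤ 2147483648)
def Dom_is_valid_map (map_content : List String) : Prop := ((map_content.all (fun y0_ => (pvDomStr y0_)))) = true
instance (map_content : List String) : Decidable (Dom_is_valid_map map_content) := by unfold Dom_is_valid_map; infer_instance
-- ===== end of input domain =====

-- B replaces A's stack-based DFS flood fill by union-find-style merging of explicit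
-- component sets and drops the blank-line checks that the wall check makes unreachable;
-- same value as A on every input admitted by Pre_ (A mutates nothing).

-- ===== PORT A =====
-- Shared low-level helpers (these pieces of code are textually identical in the
-- two Python sources, so both ports use the same transliterations).

-- CPython 'set' of nonnegative ints: exact table simulation, used only to render
-- f"{row_lengths}" (iteration order of the hash table).  Exact for hash = value
-- (Python ints 0 ≤ n < 2^61 - 1); the fuel is an upper bound on probe steps, never
-- reached by CPython's probe sequence.
def pvLinScan (table : List (Option Nat)) (h : Nat) : Nat → Nat → Option (Option Nat)
  | _, 0 => none
  | j, k+1 =>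
    match table.getD j none with
    | none => some (some j)
    | some v => if v = h then some none else pvLinScan table h (j+1) k

def pvFindSlot (table : List (Option Nat)) (mask h : Nat) : Nat → Nat → Nat → Option Nat
  | 0, _, _ => none
  | fuel+1, i, perturb =>
    match table.getD i none with
    | none => some i
    | some v =>
      if v = h then none
      else
        match (if i + 9 ≤ mask then pvLinScan table h (i+1) 9 else none) with
        | some (some j) => some j
        | some none => none
        | none =>
          let p' := perturb >>> 5
          pvFindSlot table mask h fuel ((i*5+1+p') &&& mask) p'

def pvSetInsertClean (table : List (Option Nat)) (h : Nat) : List (Option Nat) :=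
  match pvFindSlot table (table.length - 1) h (2*table.length+64) (h &&& (table.length - 1)) h with
  | none => table
  | some j => table.set j (some h)

def pvGrow (minused : Nat) : Nat → Nat → Nat
  | 0, s => s
  | f+1, s => if s ≤ minused then pvGrow minused f (s*2) else s

def pvSetAddSim (t : List (Option Nat)) (h : Nat) : List (Option Nat) :=
  let mask := t.length - 1
  match pvFindSlot t mask h (2*t.length+64) (h &&& mask) h with
  | none => t
  | some j =>
    let t' := t.set j (some h)
    let fill := (t'.filterMap id).length
    if mask * 3 ≤ fill * 5 then
      let minused := if 50000 < fill then fill*2 else fill*4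
      let ns := pvGrow minused 64 8
      (t'.filterMap id).foldl pvSetInsertClean (List.replicate ns none)
    else t'

def pvSetOrder (xs : List Nat) : List Nat :=
  ((xs.foldl pvSetAddSim (List.replicate 8 none)).filterMap id)

def pvJoinComma : List (List Char) → List Char
  | [] => []
  | [x] => x
  | x :: y :: rest => x ++ ", ".toList ++ pvJoinComma (y :: rest)

-- f"{s}" for a set s of ints: "set()" when empty, else "{a, b, …}" in table order
def pvSetReprChars (xs : List Nat) : List Char :=
  match pvSetOrder xs with
  | [] => "set()".toList
  | l => '{' :: pvJoinComma (l.map (fun n => PySem.Int.toChars (n : Int))) ++ ['}']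

def pvPassableChar (c : Char) : Bool := c == '0' || c == 'C' || c == 'E' || c == 'P'

def pvValidChar (c : Char) : Bool := c == 'E' || c == '1' || c == '0' || c == 'C' || c == 'P'

def pvCellAt (g : List (List Char)) (x y : Int) : Char :=
  PySem.List.pyGetD (PySem.List.pyGetD g x []) y ' '

-- "0 <= x < len(map_content) and 0 <= y < len(map_content[0]) and map_content[x][y] in ('0','C','E','P')"
def pvPass (g : List (List Char)) (rows cols x y : Int) : Bool :=
  decide (0 ≤ x) && decide (x < rows) && decide (0 ≤ y) && decide (y < cols) &&
    pvPassableChar (pvCellAt g x y)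

-- "not all(cell == '1' for cell in map_content[0] + map_content[-1]) or not all(line[0] == '1' and line[-1] == '1' for line in map_content)" (negated)
def pvWallsOk (g : List (List Char)) : Bool :=
  ((g.headD [] ++ g.getLastD []).all (fun c => c == '1')) &&
  (g.all (fun l => (PySem.List.pyGetD l 0 ' ' == '1') && (PySem.List.pyGetD l (-1) ' ' == '1')))

def pvPairChars (c : Int × Int) : List Char :=
  '(' :: PySem.Int.toChars c.1 ++ ", ".toList ++ PySem.Int.toChars c.2 ++ [')']

-- one step of the cell scan (identical in both sources)
def pvScanCell (i j : Int) (c : Char)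
    (acc : Option (Int × Int) × Option (Int × Int) × List (Int × Int)) :
    Except (Bool × String) (Option (Int × Int) × Option (Int × Int) × List (Int × Int)) :=
  if !pvValidChar c then
    .error (false, String.ofList ("Invalid cell '".toList ++ [c] ++ "' found at position (".toList
      ++ PySem.Int.toChars i ++ ", ".toList ++ PySem.Int.toChars j ++ [')']))
  else if c == 'P' then
    match acc.1 with
    | some _ => .error (false, "More than one player ('P')")
    | none => .ok (some (i, j), acc.2.1, acc.2.2)
  else if c == 'E' then
    match acc.2.1 with
    | some _ => .error (false, "More than one exit ('E')")
    | none => .ok (acc.1, some (i, j), acc.2.2)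
  else if c == 'C' then .ok (acc.1, acc.2.1, acc.2.2 ++ [(i, j)])
  else .ok acc

def pvScanRow (i : Int) : Int → List Char →
    (Option (Int × Int) × Option (Int × Int) × List (Int × Int)) →
    Except (Bool × String) (Option (Int × Int) × Option (Int × Int) × List (Int × Int))
  | _, [], acc => .ok acc
  | j, c :: rest, acc =>
    match pvScanCell i j c acc with
    | .error e => .error e
    | .ok acc' => pvScanRow i (j+1) rest acc'

def pvScanRows : Int → List (List Char) →
    (Option (Int × Int) × Option (Int × Int) × List (Int × Int)) →
    Except (Bool × String) (Option (Int × Int) × Option (Int × Int) × List (Int × Int))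
  | _, [], acc => .ok acc
  | i, l :: rest, acc =>
    match pvScanRow i 0 l acc with
    | .error e => .error e
    | .ok acc' => pvScanRows (i+1) rest acc'

-- A-only: the empty-line checks
def pvLeadingEmpty : List (List Char) → Nat
  | [] => 0
  | l :: rest => if PySem.Chars.strip l == [] then pvLeadingEmpty rest + 1 else 0

-- A-only: the DFS flood fill ("while stack: … stack.pop() …"); the fuel is an
-- upper bound on the number of loop iterations, proved sufficient below.
def pvDfs (g : List (List Char)) (rows cols : Int) :
    Nat → List (Int × Int) → PySem.Set (Int × Int) → PySem.Set (Int × Int)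
  | 0, _, visited => visited
  | fuel+1, stack, visited =>
    match stack.getLast? with
    | none => visited
    | some c =>
      let rest := stack.dropLast
      if visited.contains c then pvDfs g rows cols fuel rest visited
      else
        let visited' := PySem.Set.add visited c
        let nbrs := [(c.1+1, c.2), (c.1-1, c.2), (c.1, c.2+1), (c.1, c.2-1)].filter
          (fun d => pvPass g rows cols d.1 d.2)
        pvDfs g rows cols fuel (rest ++ nbrs) visited'

-- "for c in collectibles: if c not in <member>: return …" (identical loop in both
-- sources; the membership container is a parameter)
def pvCollectLoop (member : List (Int × Int)) : List (Int × Int) → Option (Bool × String)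
  | [] => none
  | c :: rest =>
    if !member.contains c then
      some (false, String.ofList ("No path from start to collectible at ".toList ++ pvPairChars c))
    else pvCollectLoop member rest

def is_valid_map (map_content : List String) : Bool × String :=
  let g := map_content.map String.toList
  let lens := g.map List.length
  if PySem.Set.len (PySem.Set.ofList (lens.map (fun n => (n : Int)))) ≠ 1 then
    (false, String.ofList ("Map is not rectangular. Row lengths: ".toList ++ pvSetReprChars lens))
  else if !pvWallsOk g then (false, "Map is not surrounded by walls")
  else
    let eb := pvLeadingEmpty g
    if 0 < eb then
      (false, String.ofList ("Map has ".toList ++ PySem.Int.toChars (eb : Int)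
        ++ " empty line(s) at the beginning".toList))
    else if (PySem.List.slice g (some 1) (some (-1))).any (fun l => PySem.Chars.strip l == []) then
      (false, "Map has empty line(s) in the middle")
    else
      match pvScanRows 0 g (none, none, []) with
      | .error e => e
      | .ok (st, ex, collect) =>
        match st with
        | none => (false, "Map missing player's starting position")
        | some start =>
          match ex with
          | none => (false, "Map missing exit")
          | some exitc =>
            if collect.isEmpty then (false, "Map missing collectibles")
            else
              let rows := PySem.List.len map_content
              let cols := PySem.List.len (g.headD [])
              let visited := pvDfs g rows cols (5 * g.length * (g.headD []).length + 5) [start] []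
              if !visited.contains exitc then (false, "No path from start to exit")
              else
                match pvCollectLoop visited collect with
                | some e => e
                | none =>
                  if PySem.Chars.strip (g.getLastD []) == [] then
                    (false, "Empty line at the end of the map")
                  else (true, "Valid map")

-- ===== PORT B =====
-- B-only: the list of passable cells, in scan order
def pvRowCells (i : Int) : Int → List Char → List (Int × Int)
  | _, [] => []
  | j, c :: rest =>
    if pvPassableChar c then (i, j) :: pvRowCells i (j+1) rest else pvRowCells i (j+1) rest

def pvCellsRows : Int → List (List Char) → List (Int × Int)
  | _, [] => []
  | i, l :: rest => pvRowCells i 0 l ++ pvCellsRows (i+1) rest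

-- B-only: merge the two component sets containing a and b (Python's identity
-- test "ca is cb" coincides with list equality because components are disjoint)
def pvMerge (comps : List (List (Int × Int))) (a b : Int × Int) : List (List (Int × Int)) :=
  let ca := (comps.find? (fun s => s.contains a)).getD []
  let cb := (comps.find? (fun s => s.contains b)).getD []
  if ca = cb then comps
  else ((comps.erase ca).erase cb) ++ [PySem.Set.union ca cb]

-- B-only: "for (i, j) in cells: for (x, y) in ((i, j+1), (i+1, j)): if …: merge"
def pvUnions (g : List (List Char)) (rows cols : Int) :
    List (List (Int × Int)) → List (Int × Int) → List (List (Int × Int))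
  | comps, [] => comps
  | comps, (i, j) :: rest =>
    let step := fun (cs : List (List (Int × Int))) (x y : Int) =>
      if decide (x < rows) && decide (y < cols) && pvPassableChar (pvCellAt g x y) then
        pvMerge cs (i, j) (x, y)
      else cs
    pvUnions g rows cols (step (step comps i (j+1)) (i+1) j) rest

def is_valid_map_alt (map_content : List String) : Bool × String :=
  let g := map_content.map String.toList
  let lens := g.map List.length
  if PySem.Set.len (PySem.Set.ofList (lens.map (fun n => (n : Int)))) ≠ 1 then
    (false, String.ofList ("Map is not rectangular. Row lengths: ".toList ++ pvSetReprChars lens))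
  else if !pvWallsOk g then (false, "Map is not surrounded by walls")
  else
    match pvScanRows 0 g (none, none, []) with
    | .error e => e
    | .ok (st, ex, collect) =>
      match st with
      | none => (false, "Map missing player's starting position")
      | some start =>
        match ex with
        | none => (false, "Map missing exit")
        | some exitc =>
          if collect.isEmpty then (false, "Map missing collectibles")
          else
            let rows := PySem.List.len map_content
            let cols := PySem.List.len (g.headD [])
            let cells := pvCellsRows 0 g
            let comps := pvUnions g rows cols (cells.map (fun c => [c])) cells
            let startComp := (comps.find? (fun s => s.contains start)).getD []
            if !startComp.contains exitc then (false, "No path from start to exit")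
            else
              match pvCollectLoop startComp collect with
              | some e => e
              | none => (true, "Valid map")

-- ===== PRECONDITION & SPEC =====
-- Pre_ excludes only inputs on which the Python A raises IndexError: a nonempty
-- map whose rows all have length 0 (the wall check indexes line[0] of an empty line).
def Pre_is_valid_map (map_content : List String) : Prop :=
  (map_content ≠ [] ∧ (∀ l ∈ map_content, l.toList.length = (map_content.headD "").toList.length) ∧
    (map_content.headD "").toList.length = 0) → False
instance (map_content : List String) : Decidable (Pre_is_valid_map map_content) := by
  unfold Pre_is_valid_map; infer_instance

def pvWitness_is_valid_map : List String := ["11111", "1P0C1", "10E01", "11111"]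

def Spec_is_valid_map (map_content : List String) (out : Bool × String) : Prop := out = is_valid_map_alt map_content
instance (map_content : List String) (out : Bool × String) : Decidable (Spec_is_valid_map map_content out) := by unfold Spec_is_valid_map; infer_instance

-- ===== CLAIM (what is proved, stated in full; the proofs are below) =====
def Claim_equal_is_valid_map : Prop := ∀ (map_content : List String), Dom_is_valid_map map_content → Pre_is_valid_map map_content → Spec_is_valid_map map_content (is_valid_map map_content)

-- ===== LEMMAS AND PROOFS =====
-- ----- generic geometry / reachability vocabulary -----
def pvInB (rows cols : Int) (c : Int × Int) : Prop :=
  0 ≤ c.1 ∧ c.1 < rows ∧ 0 ≤ c.2 ∧ c.2 < cols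

def pvStep (g : List (List Char)) (rows cols : Int) (c d : Int × Int) : Prop :=
  pvPass g rows cols d.1 d.2 = true ∧
    (d = (c.1+1, c.2) ∨ d = (c.1-1, c.2) ∨ d = (c.1, c.2+1) ∨ d = (c.1, c.2-1))

def pvR (g : List (List Char)) (rows cols : Int) (start : Int × Int) (c : Int × Int) : Prop :=
  Relation.ReflTransGen (pvStep g rows cols) start c

def pvE (g : List (List Char)) (rows cols : Int) (a b : Int × Int) : Prop :=
  pvPass g rows cols a.1 a.2 = true ∧ pvPass g rows cols b.1 b.2 = true ∧
    (b = (a.1, a.2+1) ∨ b = (a.1+1, a.2))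

def pvSym (g : List (List Char)) (rows cols : Int) (a b : Int × Int) : Prop :=
  pvE g rows cols a b ∨ pvE g rows cols b a

def pvConn (g : List (List Char)) (rows cols : Int) (a b : Int × Int) : Prop :=
  Relation.ReflTransGen (pvSym g rows cols) a b

lemma pvPass_inB {g rows cols x y} (h : pvPass g rows cols x y = true) : pvInB rows cols (x, y) := by
  simp only [pvPass, Bool.and_eq_true, decide_eq_true_eq] at h
  exact ⟨h.1.1.1.1, h.1.1.1.2, h.1.1.2, h.1.2⟩

lemma pvSym_symm {g rows cols a b} (h : pvSym g rows cols a b) : pvSym g rows cols b a := h.symm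

lemma pvConn_symm {g rows cols a b} (h : pvConn g rows cols a b) : pvConn g rows cols b a := by
  induction h with
  | refl => exact .refl
  | tail _ hstep ih => exact Relation.ReflTransGen.trans (.single (pvSym_symm hstep)) ih

lemma pvStep_of_sym {g rows cols a b} (h : pvSym g rows cols a b) : pvStep g rows cols a b := by
  rcases h with ⟨_, hb, hd⟩ | ⟨hb', ha', hd⟩
  · exact ⟨hb, by rcases hd with h | h <;> simp [h]⟩
  · refine ⟨hb', ?_⟩
    rcases hd with h | h
    · right; right; right; rw [h]; simp
    · right; left; rw [h]; simp

lemma pvSym_of_step {g rows cols a b} (ha : pvPass g rows cols a.1 a.2 = true)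
    (h : pvStep g rows cols a b) : pvSym g rows cols a b := by
  obtain ⟨hb, hd⟩ := h
  rcases hd with h | h | h | h
  · exact Or.inl ⟨ha, hb, Or.inr (by rw [h])⟩
  · exact Or.inr ⟨hb, ha, Or.inr (by rw [h]; simp)⟩
  · exact Or.inl ⟨ha, hb, Or.inl (by rw [h])⟩
  · exact Or.inr ⟨hb, ha, Or.inl (by rw [h]; simp)⟩


lemma pvR_pass {g rows cols start c} (hs : pvPass g rows cols start.1 start.2 = true)
    (h : pvR g rows cols start c) : pvPass g rows cols c.1 c.2 = true := by
  induction h with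
  | refl => exact hs
  | tail _ hstep _ => exact hstep.1

lemma pvR_iff_conn {g rows cols start c} (hs : pvPass g rows cols start.1 start.2 = true) :
    pvR g rows cols start c ↔ pvConn g rows cols start c := by
  constructor
  · intro h
    induction h with
    | refl => exact .refl
    | tail hr hstep ih => exact ih.tail (pvSym_of_step (pvR_pass hs hr) hstep)
  · intro h
    exact Relation.ReflTransGen.mono (fun a b hab => pvStep_of_sym hab) h

-- ----- cardinality of in-bounds nodup lists -----
lemma pvCard (rows cols : Int) (l : List (Int × Int)) (hn : l.Nodup)
    (hb : ∀ c ∈ l, pvInB rows cols c) : l.length ≤ rows.toNat * cols.toNat := by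
  have hsub : l ⊆ (List.range rows.toNat ×ˢ List.range cols.toNat).map
      (fun p => ((p.1 : Int), (p.2 : Int))) := by
    intro c hc
    obtain ⟨h1, h2, h3, h4⟩ := hb c hc
    refine List.mem_map.mpr ⟨(c.1.toNat, c.2.toNat), ?_, ?_⟩
    · exact List.mem_product.mpr ⟨List.mem_range.mpr (by omega), List.mem_range.mpr (by omega)⟩
    · simp only [Int.toNat_of_nonneg h1, Int.toNat_of_nonneg h3]
  have := (hn.subperm hsub).length_le
  simpa [List.length_product] using this

-- ----- DFS flood fill = reachable set -----
lemma pvDfs_main (g : List (List Char)) (rows cols : Int) (start : Int × Int) :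
    ∀ (fuel : Nat) (stack visited : List (Int × Int)),
    (∀ v ∈ visited, pvR g rows cols start v) →
    (∀ s ∈ stack, pvR g rows cols start s) →
    (∀ v ∈ visited, ∀ d, pvStep g rows cols v d → d ∈ visited ∨ d ∈ stack) →
    visited.Nodup →
    (∀ v ∈ visited, pvInB rows cols v) →
    (∀ s ∈ stack, pvInB rows cols s) →
    stack.length + 5 * (rows.toNat * cols.toNat - visited.length) < fuel →
    (∀ v ∈ visited, v ∈ pvDfs g rows cols fuel stack visited) ∧
    (∀ s ∈ stack, s ∈ pvDfs g rows cols fuel stack visited) ∧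
    (∀ c ∈ pvDfs g rows cols fuel stack visited, pvR g rows cols start c) ∧
    (∀ v ∈ pvDfs g rows cols fuel stack visited, ∀ d, pvStep g rows cols v d →
      d ∈ pvDfs g rows cols fuel stack visited) := by
  intro fuel
  induction fuel with
  | zero => intro stack visited _ _ _ _ _ _ hf; omega
  | succ fuel ih =>
    intro stack visited hv hs hcl hnd hvb hsb hf
    rcases hls : stack.getLast? with _ | c
    · have hstack : stack = [] := List.getLast?_eq_none_iff.mp hls
      subst hstack
      simp only [pvDfs, List.getLast?_nil]
      refine ⟨fun v hv' => hv', by simp, hv, fun v hv' d hd => ?_⟩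
      rcases hcl v hv' d hd with h | h
      · exact h
      · simp at h
    · obtain ⟨l', rfl⟩ := List.getLast?_eq_some_iff.mp hls
      have hdrop : (l' ++ [c]).dropLast = l' := List.dropLast_concat
      have hcR : pvR g rows cols start c := hs c (by simp)
      have hcB : pvInB rows cols c := hsb c (by simp)
      by_cases hcont : PySem.Set.contains visited c
      · have hcv : c ∈ visited := (PySem.Set.contains_iff visited c).mp hcont
        have hres : pvDfs g rows cols (fuel+1) (l' ++ [c]) visited
            = pvDfs g rows cols fuel l' visited := by
          simp only [pvDfs, hls, hdrop, hcont, if_pos]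
        rw [hres]
        have hmain := ih l' visited hv (fun s hs' => hs s (by simp [hs']))
          (fun v hv' d hd => by
            rcases hcl v hv' d hd with h | h
            · exact Or.inl h
            · rcases List.mem_append.mp h with h' | h'
              · exact Or.inr h'
              · simp at h'; subst h'; exact Or.inl hcv)
          hnd hvb (fun s hs' => hsb s (by simp [hs']))
          (by simp at hf ⊢; omega)
        refine ⟨hmain.1, fun s hs' => ?_, hmain.2.2.1, hmain.2.2.2⟩
        rcases List.mem_append.mp hs' with h' | h'
        · exact hmain.2.1 s h'
        · simp at h'; exact h' ▸ hmain.1 c hcv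
      · have hcnv : c ∉ visited := fun h => hcont ((PySem.Set.contains_iff visited c).mpr h)
        have hadd : PySem.Set.add visited c = visited ++ [c] := by
          simp only [PySem.Set.add, if_neg hcont]
        have hres : pvDfs g rows cols (fuel+1) (l' ++ [c]) visited
            = pvDfs g rows cols fuel
                (l' ++ ([(c.1+1, c.2), (c.1-1, c.2), (c.1, c.2+1), (c.1, c.2-1)].filter
                  (fun d => pvPass g rows cols d.1 d.2)))
                (PySem.Set.add visited c) := by
          simp only [pvDfs, hls, hdrop, hcont, if_neg, Bool.false_eq_true, not_false_iff]
        set nbrs := [(c.1+1, c.2), (c.1-1, c.2), (c.1, c.2+1), (c.1, c.2-1)].filter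
          (fun d => pvPass g rows cols d.1 d.2) with hnbrs
        have hmemnbrs : ∀ d, d ∈ nbrs ↔ pvStep g rows cols c d := by
          intro d
          simp only [hnbrs, List.mem_filter, pvStep, List.mem_cons, List.not_mem_nil, or_false]
          constructor
          · rintro ⟨hmem, hpred⟩
            exact ⟨hpred, by simpa using hmem⟩
          · rintro ⟨hpred, hdisj⟩
            exact ⟨by simpa using hdisj, hpred⟩
        rw [hres]
        have hvmem : ∀ v, v ∈ PySem.Set.add visited c ↔ v ∈ visited ∨ v = c := by
          intro v; exact PySem.Set.mem_add visited c v
        have hnd' : (PySem.Set.add visited c).Nodup := PySem.Set.nodup_add visited c hnd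
        have hvb' : ∀ v ∈ PySem.Set.add visited c, pvInB rows cols v := by
          intro v hv'
          rcases (hvmem v).mp hv' with h | h
          · exact hvb v h
          · subst h; exact hcB
        have hlen : (PySem.Set.add visited c).length = visited.length + 1 := by
          rw [hadd]; simp
        have hcard : (PySem.Set.add visited c).length ≤ rows.toNat * cols.toNat :=
          pvCard rows cols _ hnd' hvb'
        have hnbrs4 : nbrs.length ≤ 4 := by
          have := List.length_filter_le (fun d => pvPass g rows cols d.1 d.2)
            [(c.1+1, c.2), (c.1-1, c.2), (c.1, c.2+1), (c.1, c.2-1)]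
          simpa [hnbrs] using this
        have hmain := ih (l' ++ nbrs) (PySem.Set.add visited c)
          (fun v hv' => by
            rcases (hvmem v).mp hv' with h | h
            · exact hv v h
            · subst h; exact hcR)
          (fun s hs' => by
            rcases List.mem_append.mp hs' with h' | h'
            · exact hs s (by simp [h'])
            · exact hcR.tail ((hmemnbrs s).mp h'))
          (fun v hv' d hd => by
            rcases (hvmem v).mp hv' with h | h
            · rcases hcl v h d hd with h' | h'
              · exact Or.inl ((hvmem d).mpr (Or.inl h'))
              · rcases List.mem_append.mp h' with h'' | h''
                · exact Or.inr (List.mem_append.mpr (Or.inl h''))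
                · simp at h''; subst h''; exact Or.inl ((hvmem d).mpr (Or.inr rfl))
            · subst h
              exact Or.inr (List.mem_append.mpr (Or.inr ((hmemnbrs d).mpr hd))))
          hnd' hvb'
          (fun s hs' => by
            rcases List.mem_append.mp hs' with h' | h'
            · exact hsb s (by simp [h'])
            · have := ((hmemnbrs s).mp h').1
              have h2 := pvPass_inB this
              simpa using h2)
          (by
            simp only [List.length_append, hlen] at hf ⊢
            simp at hf
            omega)
        refine ⟨fun v hv' => hmain.1 v ((hvmem v).mpr (Or.inl hv')), fun s hs' => ?_,
          hmain.2.2.1, hmain.2.2.2⟩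
        rcases List.mem_append.mp hs' with h' | h'
        · exact hmain.2.1 s (List.mem_append.mpr (Or.inl h'))
        · simp at h'; exact h' ▸ hmain.1 c ((hvmem c).mpr (Or.inr rfl))

lemma pvDfs_mem (g : List (List Char)) (rows cols : Int) (start : Int × Int)
    (hs : pvPass g rows cols start.1 start.2 = true) (c : Int × Int) :
    c ∈ pvDfs g rows cols (5 * rows.toNat * cols.toNat + 5) [start] [] ↔
      pvR g rows cols start c := by
  have hsB : pvInB rows cols start := by
    have := pvPass_inB hs; simpa using this
  have hmain := pvDfs_main g rows cols start (5 * rows.toNat * cols.toNat + 5) [start] []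
    (by simp) (by intro s hs'; simp at hs'; subst hs'; exact .refl)
    (by simp) (by simp) (by simp)
    (by intro s hs'; simp at hs'; subst hs'; exact hsB)
    (by
      simp only [List.length_singleton, List.length_nil, Nat.sub_zero]
      have h5 : 5 * rows.toNat * cols.toNat = 5 * (rows.toNat * cols.toNat) := by ring
      omega)
  constructor
  · exact fun h => hmain.2.2.1 c h
  · intro h
    induction h with
    | refl => exact hmain.2.1 start (by simp)
    | tail hr hstep ih2 => exact hmain.2.2.2 _ ih2 _ hstep

-- ----- characterization of the passable-cell list -----
lemma pvRowCells_mem (i : Int) : ∀ (cs : List Char) (j : Int) (x : Int × Int),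
    x ∈ pvRowCells i j cs ↔
      ∃ k : Nat, ∃ hk : k < cs.length, x = (i, j + k) ∧ pvPassableChar cs[k] = true := by
  intro cs
  induction cs with
  | nil => intro j x; simp [pvRowCells]
  | cons c rest ih =>
    intro j x
    simp only [pvRowCells]
    constructor
    · intro hx
      by_cases hp : pvPassableChar c = true
      · rw [if_pos hp] at hx
        rcases List.mem_cons.mp hx with h | h
        · exact ⟨0, by simp, by simpa using h, by simpa using hp⟩
        · obtain ⟨k, hk, hxe, hpk⟩ := (ih (j+1) x).mp h
          exact ⟨k+1, by simpa using hk, by rw [hxe]; congr 1; push_cast; ring, by simpa using hpk⟩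
      · rw [if_neg hp] at hx
        obtain ⟨k, hk, hxe, hpk⟩ := (ih (j+1) x).mp hx
        exact ⟨k+1, by simpa using hk, by rw [hxe]; congr 1; push_cast; ring, by simpa using hpk⟩
    · rintro ⟨k, hk, hxe, hpk⟩
      match k with
      | 0 =>
        simp only [List.getElem_cons_zero] at hpk
        rw [if_pos hpk]
        exact List.mem_cons.mpr (Or.inl (by simpa using hxe))
      | k+1 =>
        have hmem : x ∈ pvRowCells i (j+1) rest := by
          refine (ih (j+1) x).mpr ⟨k, by simpa using hk, ?_, by simpa using hpk⟩
          rw [hxe]; congr 1; push_cast; ring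
        by_cases hp : pvPassableChar c = true
        · rw [if_pos hp]; exact List.mem_cons.mpr (Or.inr hmem)
        · rw [if_neg hp]; exact hmem

lemma pvCellsRows_mem : ∀ (ls : List (List Char)) (i : Int) (x : Int × Int),
    x ∈ pvCellsRows i ls ↔
      ∃ r : Nat, ∃ hr : r < ls.length, ∃ k : Nat, ∃ hk : k < ls[r].length,
        x = (i + r, (k : Int)) ∧ pvPassableChar ls[r][k] = true := by
  intro ls
  induction ls with
  | nil => intro i x; simp [pvCellsRows]
  | cons l rest ih =>
    intro i x
    simp only [pvCellsRows, List.mem_append]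
    constructor
    · intro hx
      rcases hx with h | h
      · obtain ⟨k, hk, hxe, hpk⟩ := (pvRowCells_mem i l 0 x).mp h
        exact ⟨0, by simp, k, by simpa using hk, by simpa using hxe, by simpa using hpk⟩
      · obtain ⟨r, hr, k, hk, hxe, hpk⟩ := (ih (i+1) x).mp h
        refine ⟨r+1, by simpa using hr, k, by simpa using hk, ?_, by simpa using hpk⟩
        rw [hxe]; simp only [Prod.mk.injEq]; exact ⟨by push_cast; ring, trivial⟩
    · rintro ⟨r, hr, k, hk, hxe, hpk⟩
      match r with
      | 0 =>
        left
        refine (pvRowCells_mem i l 0 x).mpr ⟨k, by simpa using hk, by simpa using hxe,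
          by simpa using hpk⟩
      | r+1 =>
        right
        refine (ih (i+1) x).mpr ⟨r, by simpa using hr, k, by simpa using hk, ?_, by simpa using hpk⟩
        rw [hxe]; simp only [Prod.mk.injEq]; exact ⟨by push_cast; ring, trivial⟩

lemma pvCells_iff_pass (g : List (List Char)) (W : Nat)
    (hrect : ∀ l ∈ g, l.length = W) (x : Int × Int) :
    x ∈ pvCellsRows 0 g ↔ pvPass g (g.length : Int) (W : Int) x.1 x.2 = true := by
  rw [pvCellsRows_mem]
  constructor
  · rintro ⟨r, hr, k, hk, hxe, hpk⟩
    have hW : g[r].length = W := hrect _ (List.getElem_mem hr)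
    have hx1 : x.1 = (r : Int) := by rw [hxe]; simp
    have hx2 : x.2 = (k : Int) := by rw [hxe]
    have hcell : pvCellAt g x.1 x.2 = g[r][k] := by
      rw [hx1, hx2]
      simp only [pvCellAt, PySem.List.pyGetD_natCast]
      rw [List.getD_eq_getElem _ _ hr, List.getD_eq_getElem _ _ hk]
    simp only [pvPass, Bool.and_eq_true, decide_eq_true_eq]
    refine ⟨⟨⟨⟨by omega, ?_⟩, by omega⟩, ?_⟩, by rw [hcell]; exact hpk⟩
    · rw [hx1]; exact_mod_cast hr
    · rw [hx2]; omega
  · intro hp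
    have hinb := pvPass_inB hp
    obtain ⟨h1, h2, h3, h4⟩ := hinb
    simp only at h1 h2 h3 h4
    have hr : x.1.toNat < g.length := by omega
    have hW : g[x.1.toNat].length = W := hrect _ (List.getElem_mem hr)
    have hk : x.2.toNat < g[x.1.toNat].length := by omega
    have hcell : pvCellAt g x.1 x.2 = g[x.1.toNat][x.2.toNat] := by
      simp only [pvCellAt]
      rw [PySem.List.pyGetD_eq_getElem g [] h1 (by simpa using h2)]
      rw [PySem.List.pyGetD_eq_getElem _ ' ' h3 (by rw [hW]; exact_mod_cast h4)]
    refine ⟨x.1.toNat, hr, x.2.toNat, hk, ?_, ?_⟩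
    · ext <;> simp <;> omega
    · simp only [pvPass, Bool.and_eq_true, decide_eq_true_eq] at hp
      rw [← hcell]; exact hp.2

lemma pvRowCells_nodup (i : Int) : ∀ (cs : List Char) (j : Int),
    (pvRowCells i j cs).Nodup ∧ ∀ x ∈ pvRowCells i j cs, x.1 = i ∧ j ≤ x.2 := by
  intro cs
  induction cs with
  | nil => intro j; simp [pvRowCells]
  | cons c rest ih =>
    intro j
    obtain ⟨ihnd, ihb⟩ := ih (j+1)
    simp only [pvRowCells]
    by_cases hp : pvPassableChar c = true
    · rw [if_pos hp]
      refine ⟨List.nodup_cons.mpr ⟨fun hmem => ?_, ihnd⟩, ?_⟩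
      · have h2 : j + 1 ≤ j := (ihb _ hmem).2
        omega
      · intro x hx
        rcases List.mem_cons.mp hx with h | h
        · subst h; exact ⟨rfl, le_refl _⟩
        · have := ihb x h; exact ⟨this.1, by omega⟩
    · rw [if_neg hp]
      exact ⟨ihnd, fun x hx => ⟨(ihb x hx).1, by have := (ihb x hx).2; omega⟩⟩

lemma pvCellsRows_nodup : ∀ (ls : List (List Char)) (i : Int),
    (pvCellsRows i ls).Nodup ∧ ∀ x ∈ pvCellsRows i ls, i ≤ x.1 := by
  intro ls
  induction ls with
  | nil => intro i; simp [pvCellsRows]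
  | cons l rest ih =>
    intro i
    obtain ⟨ihnd, ihb⟩ := ih (i+1)
    obtain ⟨rnd, rb⟩ := pvRowCells_nodup i l 0
    simp only [pvCellsRows]
    constructor
    · rw [List.nodup_append]
      refine ⟨rnd, ihnd, ?_⟩
      intro x hx y hy
      have h1 := (rb x hx).1
      have h2 := ihb y hy
      intro he
      rw [he] at h1
      omega
    · intro x hx
      rcases List.mem_append.mp hx with h | h
      · exact le_of_eq (rb x h).1.symm
      · have := ihb x h; omega

-- ----- partitions into components -----
def pvDisj (comps : List (List (Int × Int))) : Prop :=
  List.Pairwise (fun s t => ∀ x, x ∈ s → x ∉ t) comps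

def pvGood (cells : List (Int × Int)) (comps : List (List (Int × Int))) : Prop :=
  (∀ x ∈ cells, ∃ s ∈ comps, x ∈ s) ∧ (∀ s ∈ comps, ∀ x ∈ s, x ∈ cells) ∧
    (∀ s ∈ comps, s ≠ []) ∧ pvDisj comps

def pvSameC (comps : List (List (Int × Int))) (x y : Int × Int) : Prop :=
  ∃ s ∈ comps, x ∈ s ∧ y ∈ s

lemma pvUnique {comps : List (List (Int × Int))} (hd : pvDisj comps)
    {s t : List (Int × Int)} {x : Int × Int} (hs : s ∈ comps) (ht : t ∈ comps)
    (hxs : x ∈ s) (hxt : x ∈ t) : s = t := by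
  induction comps with
  | nil => simp at hs
  | cons h tl ih =>
    have hd' := List.pairwise_cons.mp hd
    rcases List.mem_cons.mp hs with rfl | hs'
    · rcases List.mem_cons.mp ht with rfl | ht'
      · rfl
      · exact absurd hxt (hd'.1 t ht' x hxs)
    · rcases List.mem_cons.mp ht with rfl | ht'
      · exact absurd hxs (hd'.1 s hs' x hxt)
      · exact ih hd'.2 hs' ht'

lemma pvDisj_nodup : ∀ (comps : List (List (Int × Int))),
    (∀ s ∈ comps, s ≠ []) → pvDisj comps → comps.Nodup := by
  intro comps
  induction comps with
  | nil => intro _ _; simp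
  | cons h tl ih =>
    intro hne hd
    have hd' := List.pairwise_cons.mp hd
    refine List.nodup_cons.mpr ⟨fun hmem => ?_,
      ih (fun s hs => hne s (List.mem_cons_of_mem _ hs)) hd'.2⟩
    rcases hx : h with _ | ⟨x, h'⟩
    · exact hne h List.mem_cons_self hx
    · exact hd'.1 h hmem x (by rw [hx]; exact List.mem_cons_self)
        (by rw [hx]; exact List.mem_cons_self)

lemma pvGood_nodup {cells comps} (hg : pvGood cells comps) : comps.Nodup :=
  pvDisj_nodup comps hg.2.2.1 hg.2.2.2

lemma pvFindComp {cells comps} (hg : pvGood cells comps) {a : Int × Int} (ha : a ∈ cells) :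
    ((comps.find? (fun s => s.contains a)).getD []) ∈ comps ∧
      a ∈ ((comps.find? (fun s => s.contains a)).getD []) ∧
      (∀ s ∈ comps, a ∈ s → s = ((comps.find? (fun s => s.contains a)).getD [])) := by
  obtain ⟨hcov, _, _, hd⟩ := hg
  obtain ⟨s0, hs0, has0⟩ := hcov a ha
  have hsome : (comps.find? (fun s => s.contains a)).isSome := by
    rw [List.find?_isSome]
    exact ⟨s0, hs0, by simpa using has0⟩
  obtain ⟨ca, hca⟩ := Option.isSome_iff_exists.mp hsome
  rw [hca]
  have hmem : ca ∈ comps := List.mem_of_find?_eq_some hca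
  have hpred : a ∈ ca := by have := List.find?_some hca; simpa using this
  exact ⟨hmem, hpred, fun s hs has => pvUnique hd hs hmem has hpred⟩

lemma pvMerge_all {g : List (List Char)} {rows cols : Int} {cells : List (Int × Int)}
    {comps : List (List (Int × Int))} {a b : Int × Int}
    (hg : pvGood cells comps) (ha : a ∈ cells) (hb : b ∈ cells)
    (hconn : pvConn g rows cols a b)
    (hbound : ∀ x y, pvSameC comps x y → pvConn g rows cols x y) :
    pvGood cells (pvMerge comps a b) ∧
    (∀ x y, pvSameC comps x y → pvSameC (pvMerge comps a b) x y) ∧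
    pvSameC (pvMerge comps a b) a b ∧
    (∀ x y, pvSameC (pvMerge comps a b) x y → pvConn g rows cols x y) := by
  obtain ⟨hamem, haa, hauniq⟩ := pvFindComp hg ha
  obtain ⟨hbmem, hbb, hbuniq⟩ := pvFindComp hg hb
  set ca := (comps.find? (fun s => s.contains a)).getD [] with hca
  set cb := (comps.find? (fun s => s.contains b)).getD [] with hcb
  by_cases he : ca = cb
  · have hres : pvMerge comps a b = comps := by
      simp only [pvMerge, ← hca, ← hcb, if_pos he]
    rw [hres]
    exact ⟨hg, fun x y h => h, ⟨ca, hamem, haa, he ▸ hbb⟩, hbound⟩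
  · have hres : pvMerge comps a b = ((comps.erase ca).erase cb) ++ [PySem.Set.union ca cb] := by
      simp only [pvMerge, ← hca, ← hcb, if_neg he]
    have hnd := pvGood_nodup hg
    have hnd1 : (comps.erase ca).Nodup := hnd.erase ca
    have hu : ∀ x, x ∈ PySem.Set.union ca cb ↔ x ∈ ca ∨ x ∈ cb :=
      fun x => PySem.Set.mem_union ca cb x
    have hmem_res : ∀ s, s ∈ pvMerge comps a b ↔
        (s ∈ comps ∧ s ≠ ca ∧ s ≠ cb) ∨ s = PySem.Set.union ca cb := by
      intro s
      rw [hres, List.mem_append, hnd1.mem_erase_iff, hnd.mem_erase_iff, List.mem_singleton]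
      tauto
    obtain ⟨hcov, hsub, hne, hd⟩ := hg
    have hgood : pvGood cells (pvMerge comps a b) := by
      refine ⟨?_, ?_, ?_, ?_⟩
      · intro x hx
        obtain ⟨s, hs, hxs⟩ := hcov x hx
        by_cases h1 : s = ca
        · exact ⟨_, (hmem_res _).mpr (Or.inr rfl), (hu x).mpr (Or.inl (h1 ▸ hxs))⟩
        · by_cases h2 : s = cb
          · exact ⟨_, (hmem_res _).mpr (Or.inr rfl), (hu x).mpr (Or.inr (h2 ▸ hxs))⟩
          · exact ⟨s, (hmem_res s).mpr (Or.inl ⟨hs, h1, h2⟩), hxs⟩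
      · intro s hs x hxs
        rcases (hmem_res s).mp hs with ⟨h1, _, _⟩ | h1
        · exact hsub s h1 x hxs
        · subst h1
          rcases (hu x).mp hxs with h | h
          · exact hsub ca hamem x h
          · exact hsub cb hbmem x h
      · intro s hs
        rcases (hmem_res s).mp hs with ⟨h1, _, _⟩ | h1
        · exact hne s h1
        · subst h1
          exact List.ne_nil_of_mem ((hu a).mpr (Or.inl haa))
      · rw [hres]
        refine List.pairwise_append.mpr ⟨?_, List.pairwise_singleton _ _, ?_⟩
        · exact hd.sublist ((List.erase_sublist).trans (List.erase_sublist))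
        · intro s hs t ht
          rw [List.mem_singleton] at ht
          subst ht
          have hs1 : s ≠ cb ∧ s ∈ comps.erase ca := hnd1.mem_erase_iff.mp hs
          have hs2 : s ≠ ca ∧ s ∈ comps := hnd.mem_erase_iff.mp hs1.2
          intro x hxs hxu
          rcases (hu x).mp hxu with h | h
          · exact hs2.1 (pvUnique hd hs2.2 hamem hxs h)
          · exact hs1.1 (pvUnique hd hs2.2 hbmem hxs h)
    have hmono : ∀ x y, pvSameC comps x y → pvSameC (pvMerge comps a b) x y := by
      intro x y ⟨s, hs, hxs, hys⟩
      by_cases h1 : s = ca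
      · exact ⟨_, (hmem_res _).mpr (Or.inr rfl),
          (hu x).mpr (Or.inl (h1 ▸ hxs)), (hu y).mpr (Or.inl (h1 ▸ hys))⟩
      · by_cases h2 : s = cb
        · exact ⟨_, (hmem_res _).mpr (Or.inr rfl),
            (hu x).mpr (Or.inr (h2 ▸ hxs)), (hu y).mpr (Or.inr (h2 ▸ hys))⟩
        · exact ⟨s, (hmem_res s).mpr (Or.inl ⟨hs, h1, h2⟩), hxs, hys⟩
    refine ⟨hgood, hmono, ?_, ?_⟩
    · exact ⟨_, (hmem_res _).mpr (Or.inr rfl), (hu a).mpr (Or.inl haa), (hu b).mpr (Or.inr hbb)⟩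
    · intro x y ⟨s, hs, hxs, hys⟩
      rcases (hmem_res s).mp hs with ⟨h1, _, _⟩ | h1
      · exact hbound x y ⟨s, h1, hxs, hys⟩
      · subst h1
        have hxc : pvConn g rows cols x a ∨ pvConn g rows cols x b := by
          rcases (hu x).mp hxs with h | h
          · exact Or.inl (hbound x a ⟨ca, hamem, h, haa⟩)
          · exact Or.inr (hbound x b ⟨cb, hbmem, h, hbb⟩)
        have hyc : pvConn g rows cols a y ∨ pvConn g rows cols b y := by
          rcases (hu y).mp hys with h | h
          · exact Or.inl (pvConn_symm (hbound y a ⟨ca, hamem, h, haa⟩))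
          · exact Or.inr (pvConn_symm (hbound y b ⟨cb, hbmem, h, hbb⟩))
        rcases hxc with h | h <;> rcases hyc with h' | h'
        · exact h.trans h'
        · exact (h.trans hconn).trans h'
        · exact (h.trans (pvConn_symm hconn)).trans h'
        · exact h.trans h'

lemma pvUnions_main (g : List (List Char)) (rows cols : Int) (cells : List (Int × Int))
    (hcells : ∀ x, x ∈ cells ↔ pvPass g rows cols x.1 x.2 = true) :
    ∀ (rest : List (Int × Int)) (comps : List (List (Int × Int))),
    rest ⊆ cells → pvGood cells comps →
    (∀ x y, pvSameC comps x y → pvConn g rows cols x y) →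
    (∀ a b, pvE g rows cols a b → a ∉ rest → pvSameC comps a b) →
    pvGood cells (pvUnions g rows cols comps rest) ∧
    (∀ x y, pvSameC (pvUnions g rows cols comps rest) x y → pvConn g rows cols x y) ∧
    (∀ a b, pvE g rows cols a b → pvSameC (pvUnions g rows cols comps rest) a b) ∧
    (∀ x y, pvSameC comps x y → pvSameC (pvUnions g rows cols comps rest) x y) := by
  intro rest
  induction rest with
  | nil =>
    intro comps _ hg hbound hproc
    refine ⟨hg, hbound, ?_, fun x y h => h⟩
    intro a b hE
    exact hproc a b hE (by simp)
  | cons c rest' ih =>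
    obtain ⟨i, j⟩ := c
    intro comps hsub hg hbound hproc
    have hain : (i, j) ∈ cells := hsub List.mem_cons_self
    have hpa : pvPass g rows cols i j = true := by
      have := (hcells (i, j)).mp hain; simpa using this
    have hpaB := pvPass_inB hpa
    have hi0 : 0 ≤ i := hpaB.1
    have hir : i < rows := hpaB.2.1
    have hj0 : 0 ≤ j := hpaB.2.2.1
    have hjc : j < cols := hpaB.2.2.2
    have hres : pvUnions g rows cols comps ((i, j) :: rest') =
        pvUnions g rows cols
          ((fun cs x y => if decide (x < rows) && decide (y < cols)
              && pvPassableChar (pvCellAt g x y) then pvMerge cs (i, j) (x, y) else cs)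
            ((fun cs x y => if decide (x < rows) && decide (y < cols)
              && pvPassableChar (pvCellAt g x y) then pvMerge cs (i, j) (x, y) else cs)
              comps i (j+1)) (i+1) j) rest' := rfl
    -- step 1 : the right neighbour (i, j+1)
    set G1 := (decide (i < rows) && decide (j+1 < cols) && pvPassableChar (pvCellAt g i (j+1)))
      with hG1
    set G2 := (decide (i+1 < rows) && decide (j < cols) && pvPassableChar (pvCellAt g (i+1) j))
      with hG2
    set comps1 := if G1 then pvMerge comps (i, j) (i, j+1) else comps with hc1
    set comps2 := if G2 then pvMerge comps1 (i, j) (i+1, j) else comps1 with hc2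
    have hres2 : pvUnions g rows cols comps ((i, j) :: rest') =
        pvUnions g rows cols comps2 rest' := hres
    have hstep1 : pvGood cells comps1 ∧
        (∀ x y, pvSameC comps1 x y → pvConn g rows cols x y) ∧
        (∀ x y, pvSameC comps x y → pvSameC comps1 x y) ∧
        (G1 = true → pvSameC comps1 (i, j) (i, j+1)) := by
      by_cases hg1 : G1 = true
      · have hpb : pvPass g rows cols i (j+1) = true := by
          rw [hG1] at hg1
          simp only [Bool.and_eq_true, decide_eq_true_eq] at hg1
          simp only [pvPass, Bool.and_eq_true, decide_eq_true_eq]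
          exact ⟨⟨⟨⟨hi0, hg1.1.1⟩, by omega⟩, hg1.1.2⟩, hg1.2⟩
        have hbin : ((i, j+1) : Int × Int) ∈ cells := (hcells (i, j+1)).mpr (by simpa using hpb)
        have hE : pvE g rows cols (i, j) (i, j+1) := ⟨by simpa using hpa, by simpa using hpb, Or.inl rfl⟩
        have hm := pvMerge_all hg hain hbin (Relation.ReflTransGen.single (Or.inl hE)) hbound
        rw [hc1, if_pos hg1]
        exact ⟨hm.1, hm.2.2.2, hm.2.1, fun _ => hm.2.2.1⟩
      · rw [hc1, if_neg hg1]
        exact ⟨hg, hbound, fun x y h => h, fun h => absurd h hg1⟩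
    have hstep2 : pvGood cells comps2 ∧
        (∀ x y, pvSameC comps2 x y → pvConn g rows cols x y) ∧
        (∀ x y, pvSameC comps1 x y → pvSameC comps2 x y) ∧
        (G2 = true → pvSameC comps2 (i, j) (i+1, j)) := by
      by_cases hg2 : G2 = true
      · have hpb : pvPass g rows cols (i+1) j = true := by
          rw [hG2] at hg2
          simp only [Bool.and_eq_true, decide_eq_true_eq] at hg2
          simp only [pvPass, Bool.and_eq_true, decide_eq_true_eq]
          exact ⟨⟨⟨⟨by omega, hg2.1.1⟩, hj0⟩, hg2.1.2⟩, hg2.2⟩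
        have hbin : ((i+1, j) : Int × Int) ∈ cells := (hcells (i+1, j)).mpr (by simpa using hpb)
        have hE : pvE g rows cols (i, j) (i+1, j) := ⟨by simpa using hpa, by simpa using hpb, Or.inr rfl⟩
        have hm := pvMerge_all hstep1.1 hain hbin (Relation.ReflTransGen.single (Or.inl hE))
          hstep1.2.1
        rw [hc2, if_pos hg2]
        exact ⟨hm.1, hm.2.2.2, hm.2.1, fun _ => hm.2.2.1⟩
      · rw [hc2, if_neg hg2]
        exact ⟨hstep1.1, hstep1.2.1, fun x y h => h, fun h => absurd h hg2⟩
    have hproc2 : ∀ a b, pvE g rows cols a b → a ∉ rest' → pvSameC comps2 a b := by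
      intro a b hE hnr
      by_cases hac : a = (i, j)
      · subst hac
        rcases hE.2.2 with hbr | hbd
        · have hg1 : G1 = true := by
            rw [hG1]
            have hpb := hE.2.1
            rw [hbr] at hpb
            simp only [pvPass, Bool.and_eq_true, decide_eq_true_eq] at hpb
            simp only [Bool.and_eq_true, decide_eq_true_eq]
            exact ⟨⟨hpb.1.1.1.2, hpb.1.2⟩, hpb.2⟩
          have := hstep1.2.2.2 hg1
          rw [← hbr] at this
          exact hstep2.2.2.1 _ _ this
        · have hg2 : G2 = true := by
            rw [hG2]
            have hpb := hE.2.1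
            rw [hbd] at hpb
            simp only [pvPass, Bool.and_eq_true, decide_eq_true_eq] at hpb
            simp only [Bool.and_eq_true, decide_eq_true_eq]
            exact ⟨⟨hpb.1.1.1.2, hpb.1.2⟩, hpb.2⟩
          have := hstep2.2.2.2 hg2
          rw [← hbd] at this
          exact this
      · have hnr' : a ∉ (i, j) :: rest' := by
          intro hmem
          rcases List.mem_cons.mp hmem with h | h
          · exact hac h
          · exact hnr h
        exact hstep2.2.2.1 _ _ (hstep1.2.2.1 _ _ (hproc a b hE hnr'))
    rw [hres2]
    have hmain := ih comps2 (fun x hx => hsub (List.mem_cons_of_mem _ hx)) hstep2.1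
      hstep2.2.1 hproc2
    refine ⟨hmain.1, hmain.2.1, hmain.2.2.1, ?_⟩
    intro x y h
    exact hmain.2.2.2 x y (hstep2.2.2.1 x y (hstep1.2.2.1 x y h))

lemma pvConn_to_sameC {g : List (List Char)} {rows cols : Int} {cells : List (Int × Int)}
    {comps : List (List (Int × Int))} {start : Int × Int}
    (hg : pvGood cells comps)
    (hcomplete : ∀ a b, pvE g rows cols a b → pvSameC comps a b)
    (hstart : start ∈ cells) :
    ∀ x, pvConn g rows cols start x → pvSameC comps start x := by
  intro x hconn
  induction hconn with
  | refl =>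
    obtain ⟨s, hs, hxs⟩ := hg.1 start hstart
    exact ⟨s, hs, hxs, hxs⟩
  | tail hr hstep ih =>
    rename_i u v
    have huv : pvSameC comps u v := by
      rcases hstep with hE | hE
      · exact hcomplete u v hE
      · obtain ⟨s, hs, h1, h2⟩ := hcomplete v u hE
        exact ⟨s, hs, h2, h1⟩
    obtain ⟨s, hs, hss, hsu⟩ := ih
    obtain ⟨t, ht, htu, htv⟩ := huv
    have : s = t := pvUnique hg.2.2.2 hs ht hsu htu
    exact ⟨s, hs, hss, this ▸ htv⟩

lemma pvB_mem (g : List (List Char)) (W : Nat) (start : Int × Int)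
    (hrect : ∀ l ∈ g, l.length = W)
    (hstart : pvPass g (g.length : Int) (W : Int) start.1 start.2 = true) (x : Int × Int) :
    x ∈ ((pvUnions g (g.length : Int) (W : Int)
        ((pvCellsRows 0 g).map (fun c => [c])) (pvCellsRows 0 g)).find?
        (fun s => s.contains start)).getD [] ↔
      pvR g (g.length : Int) (W : Int) start x := by
  set rows := (g.length : Int)
  set cols := (W : Int)
  set cells := pvCellsRows 0 g with hcellsdef
  have hcells : ∀ x, x ∈ cells ↔ pvPass g rows cols x.1 x.2 = true :=
    fun x => pvCells_iff_pass g W hrect x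
  have hcnd := (pvCellsRows_nodup g 0).1
  have hg0 : pvGood cells (cells.map (fun c => [c])) := by
    refine ⟨?_, ?_, ?_, ?_⟩
    · exact fun x hx => ⟨[x], List.mem_map.mpr ⟨x, hx, rfl⟩, List.mem_singleton.mpr rfl⟩
    · intro s hs x hxs
      obtain ⟨c, hc, rfl⟩ := List.mem_map.mp hs
      rw [List.mem_singleton] at hxs
      exact hxs ▸ hc
    · intro s hs
      obtain ⟨c, _, rfl⟩ := List.mem_map.mp hs
      simp
    · exact List.pairwise_map.mpr (hcnd.imp (fun hab => by
        intro x hx hy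
        rw [List.mem_singleton] at hx hy
        exact hab (hx ▸ hy)))
  have hb0 : ∀ x y, pvSameC (cells.map (fun c => [c])) x y → pvConn g rows cols x y := by
    intro x y ⟨s, hs, hxs, hys⟩
    obtain ⟨c, _, rfl⟩ := List.mem_map.mp hs
    rw [List.mem_singleton] at hxs hys
    rw [hxs, ← hys] at *
    exact Relation.ReflTransGen.refl
  have hp0 : ∀ a b, pvE g rows cols a b → a ∉ cells → pvSameC (cells.map (fun c => [c])) a b := by
    intro a b hE hna
    exact absurd ((hcells a).mpr hE.1) hna
  have hmain := pvUnions_main g rows cols cells hcells cells (cells.map (fun c => [c]))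
    (fun x hx => hx) hg0 hb0 hp0
  have hsmem : start ∈ cells := (hcells start).mpr hstart
  obtain ⟨hscm, hscs, hscu⟩ := pvFindComp hmain.1 hsmem
  constructor
  · intro hx
    have hsame : pvSameC (pvUnions g rows cols (cells.map (fun c => [c])) cells) start x :=
      ⟨_, hscm, hscs, hx⟩
    have hconn := hmain.2.1 start x hsame
    exact (pvR_iff_conn hstart).mpr hconn
  · intro hr
    have hconn := (pvR_iff_conn hstart).mp hr
    have hsame := pvConn_to_sameC hmain.1 hmain.2.2.1 hsmem x hconn
    obtain ⟨s, hs, hss, hsx⟩ := hsame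
    have := hscu s hs hss
    exact this ▸ hsx

-- ----- the scan only ever records a passable 'P' cell as start -----
lemma pvScanCell_shape {i j : Int} {c : Char} {acc acc'}
    (hres : pvScanCell i j c acc = .ok acc') :
    acc'.1 = acc.1 ∨ (acc'.1 = some (i, j) ∧ c = 'P') := by
  unfold pvScanCell at hres
  by_cases h1 : (!pvValidChar c) = true
  · rw [if_pos h1] at hres; exact absurd hres (by simp)
  · rw [if_neg h1] at hres
    by_cases h2 : (c == 'P') = true
    · rw [if_pos h2] at hres
      rcases hacc : acc.1 with _ | s0
      · rw [hacc] at hres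
        have : acc' = (some (i, j), acc.2.1, acc.2.2) := by
          injection hres with h; exact h.symm
        exact Or.inr ⟨by rw [this], by simpa using h2⟩
      · rw [hacc] at hres; exact absurd hres (by simp)
    · rw [if_neg h2] at hres
      by_cases h3 : (c == 'E') = true
      · rw [if_pos h3] at hres
        rcases hacc : acc.2.1 with _ | e0
        · rw [hacc] at hres
          have : acc' = (acc.1, some (i, j), acc.2.2) := by
            injection hres with h; exact h.symm
          exact Or.inl (by rw [this])
        · rw [hacc] at hres; exact absurd hres (by simp)
      · rw [if_neg h3] at hres
        by_cases h4 : (c == 'C') = true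
        · rw [if_pos h4] at hres
          have : acc' = (acc.1, acc.2.1, acc.2.2 ++ [(i, j)]) := by
            injection hres with h; exact h.symm
          exact Or.inl (by rw [this])
        · rw [if_neg h4] at hres
          have : acc' = acc := by injection hres with h; exact h.symm
          exact Or.inl (by rw [this])

lemma pvCellAt_eq (g : List (List Char)) (n m : Nat) (hn : n < g.length)
    (hm : m < (g[n]).length) : pvCellAt g (n : Int) (m : Int) = g[n][m] := by
  simp only [pvCellAt, PySem.List.pyGetD_natCast]
  rw [List.getD_eq_getElem _ _ hn, List.getD_eq_getElem _ _ hm]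

lemma pvScanRow_P (g : List (List Char)) (rows cols : Int) (n : Nat) (l : List Char)
    (hn : n < g.length) (hl : g[n] = l) (hcol : (l.length : Int) ≤ cols)
    (hrows : (g.length : Int) ≤ rows) :
    ∀ (cs : List Char) (m : Nat) (acc acc'), cs = l.drop m →
    pvScanRow (n : Int) (m : Int) cs acc = .ok acc' →
    (∀ s, acc.1 = some s → pvPass g rows cols s.1 s.2 = true) →
    (∀ s, acc'.1 = some s → pvPass g rows cols s.1 s.2 = true) := by
  intro cs
  induction cs with
  | nil =>
    intro m acc acc' _ hres hP
    unfold pvScanRow at hres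
    have : acc' = acc := by injection hres with h; exact h.symm
    rw [this]; exact hP
  | cons c rest ih =>
    intro m acc acc' hdrop hres hP
    have hm : m < l.length := by
      by_contra hcon
      rw [List.drop_eq_nil_of_le (by omega)] at hdrop
      exact absurd hdrop (by simp)
    have hc : l[m] = c := by
      have h0 : (l.drop m)[0]? = some c := by rw [← hdrop]; rfl
      rw [List.getElem?_drop] at h0
      simp only [Nat.add_zero] at h0
      rw [List.getElem?_eq_getElem hm] at h0
      injection h0
    have hrest : rest = l.drop (m+1) := by
      have := congrArg List.tail hdrop
      simpa [List.tail_drop] using this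
    unfold pvScanRow at hres
    rcases hsc : pvScanCell (n : Int) (m : Int) c acc with e | acc1
    · rw [hsc] at hres; exact absurd hres (by simp)
    · rw [hsc] at hres
      have hP1 : ∀ s, acc1.1 = some s → pvPass g rows cols s.1 s.2 = true := by
        intro s hs
        rcases pvScanCell_shape hsc with h | ⟨h, hcP⟩
        · exact hP s (by rw [← h]; exact hs)
        · rw [h] at hs
          injection hs with hs
          subst hs
          simp only [pvPass, Bool.and_eq_true, decide_eq_true_eq]
          have hmg : m < (g[n]).length := by rw [hl]; exact hm
          have hgl : g[n][m] = l[m] := by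
            have h0 : g[n][m]? = l[m]? := by rw [hl]
            rw [List.getElem?_eq_getElem hmg, List.getElem?_eq_getElem hm] at h0
            injection h0
          have hcell : pvCellAt g (n : Int) (m : Int) = 'P' := by
            rw [pvCellAt_eq g n m hn hmg, hgl, hc, hcP]
          refine ⟨⟨⟨⟨by positivity, by omega⟩, by positivity⟩, by omega⟩, ?_⟩
          rw [hcell]; rfl
      have hcast : ((m+1 : Nat) : Int) = (m : Int) + 1 := by push_cast; ring
      have hres' : pvScanRow (n : Int) ((m+1 : Nat) : Int) rest acc1 = .ok acc' := by
        rw [hcast]; exact hres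
      exact ih (m+1) acc1 acc' hrest hres' hP1

lemma pvScanRows_P (g : List (List Char)) (rows cols : Int)
    (hrows : (g.length : Int) ≤ rows) (hcol : ∀ l ∈ g, (l.length : Int) ≤ cols) :
    ∀ (ls : List (List Char)) (n : Nat) (acc acc'), ls = g.drop n →
    pvScanRows (n : Int) ls acc = .ok acc' →
    (∀ s, acc.1 = some s → pvPass g rows cols s.1 s.2 = true) →
    (∀ s, acc'.1 = some s → pvPass g rows cols s.1 s.2 = true) := by
  intro ls
  induction ls with
  | nil =>
    intro n acc acc' _ hres hP
    unfold pvScanRows at hres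
    have : acc' = acc := by injection hres with h; exact h.symm
    rw [this]; exact hP
  | cons l rest ih =>
    intro n acc acc' hdrop hres hP
    have hn : n < g.length := by
      by_contra hcon
      rw [List.drop_eq_nil_of_le (by omega)] at hdrop
      exact absurd hdrop (by simp)
    have hc : g[n] = l := by
      have h0 : (g.drop n)[0]? = some l := by rw [← hdrop]; rfl
      rw [List.getElem?_drop] at h0
      simp only [Nat.add_zero] at h0
      rw [List.getElem?_eq_getElem hn] at h0
      injection h0
    have hrest : rest = g.drop (n+1) := by
      have := congrArg List.tail hdrop
      simpa [List.tail_drop] using this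
    unfold pvScanRows at hres
    rcases hsc : pvScanRow (n : Int) 0 l acc with e | acc1
    · rw [hsc] at hres; exact absurd hres (by simp)
    · rw [hsc] at hres
      have hP1 := pvScanRow_P g rows cols n l hn hc
        (hcol l (hc ▸ List.getElem_mem hn)) hrows l 0 acc acc1 (by simp)
        (by simpa using hsc) hP
      have hcast : ((n+1 : Nat) : Int) = (n : Int) + 1 := by push_cast; ring
      have hres' : pvScanRows ((n+1 : Nat) : Int) rest acc1 = .ok acc' := by
        rw [hcast]; exact hres
      exact ih (n+1) acc1 acc' hrest hres' hP1

-- ----- the walls check makes every blank-line check unreachable -----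
lemma pvStrip_ne {l : List Char} (h : '1' ∈ l) : (PySem.Chars.strip l == []) = false := by
  simp only [PySem.Chars.strip, PySem.Chars.lstrip, PySem.Chars.rstrip, beq_eq_false_iff_ne,
    ne_eq, List.reverse_eq_nil_iff, List.dropWhile_eq_nil_iff]
  intro hall
  have h1 : '1' ∈ List.dropWhile PySem.Chars.isspace l := by
    have := List.takeWhile_append_dropWhile (p := PySem.Chars.isspace) (l := l)
    rcases List.mem_append.mp (by rw [this]; exact h) with hm | hm
    · have := List.mem_takeWhile_imp hm
      simp [PySem.Chars.isspace] at this
    · exact hm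
  have := hall '1' (List.mem_reverse.mpr h1)
  simp [PySem.Chars.isspace] at this

lemma pvWalls_head {g : List (List Char)} (hw : pvWallsOk g = true) {l : List Char}
    (hl : l ∈ g) (hne : l ≠ []) : '1' ∈ l := by
  obtain ⟨c, t, rfl⟩ := List.exists_cons_of_ne_nil hne
  have h2 := (List.all_eq_true.mp (Bool.and_elim_right hw)) _ hl
  have hc : c = '1' := by
    have := Bool.and_elim_left h2
    rw [PySem.List.pyGetD_zero_cons] at this
    simpa using this
  rw [hc]; exact List.mem_cons_self

lemma pvSlice_sub {g : List (List Char)} {l : List Char}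
    (h : l ∈ PySem.List.slice g (some 1) (some (-1))) : l ∈ g := by
  simp only [PySem.List.slice] at h
  exact List.mem_of_mem_drop (List.mem_of_mem_take h)

-- ----- the rectangularity check -----
lemma pvRect_of_len_one {lens : List Nat}
    (h : PySem.Set.len (PySem.Set.ofList (lens.map (fun n => (n : Int)))) = 1) :
    lens ≠ [] ∧ ∀ x ∈ lens, x = lens.headD 0 := by
  have hlen : (PySem.Set.ofList (lens.map (fun n => (n : Int)))).length = 1 := by
    simpa [PySem.Set.len] using h
  obtain ⟨w, hw⟩ := List.length_eq_one_iff.mp hlen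
  have hmem : ∀ x ∈ lens, (x : Int) = w := by
    intro x hx
    have : (x : Int) ∈ PySem.Set.ofList (lens.map (fun n => (n : Int))) :=
      (PySem.Set.mem_ofList _ _).mpr (by
        have := List.mem_map_of_mem (f := fun n : Nat => (n : Int)) hx
        simpa using this)
    rw [hw] at this
    simpa using this
  have hne : lens ≠ [] := by
    rintro rfl
    simp [PySem.Set.ofList, PySem.Set.empty] at hw
  obtain ⟨a, tl, rfl⟩ := List.exists_cons_of_ne_nil hne
  refine ⟨by simp, fun x hx => ?_⟩
  have h1 := hmem x hx
  have h2 := hmem a List.mem_cons_self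
  simp only [List.headD_cons]
  omega

-- ----- the collectible loop only depends on membership -----
lemma pvCollectLoop_congr (v1 v2 : List (Int × Int)) (h : ∀ x, x ∈ v1 ↔ x ∈ v2) :
    ∀ l, pvCollectLoop v1 l = pvCollectLoop v2 l := by
  intro l
  induction l with
  | nil => rfl
  | cons c rest ih =>
    unfold pvCollectLoop
    have hcc : v1.contains c = v2.contains c := by
      rw [Bool.eq_iff_iff]
      simp only [List.contains_iff_mem]
      exact h c
    rw [hcc, ih]

lemma pvGetLastD_mem {g : List (List Char)} (h : g ≠ []) : g.getLastD [] ∈ g := by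
  rcases g with _ | ⟨l0, rest⟩
  · exact absurd rfl h
  · rw [List.getLastD_eq_getLast?, List.getLast?_eq_some_getLast (by simp)]
    exact List.getLast_mem (by simp : (l0 :: rest) ≠ [])

lemma pvMainEq (m : List String)
    (hpre : (m ≠ [] ∧ (∀ l ∈ m, l.toList.length = (m.headD "").toList.length) ∧
      (m.headD "").toList.length = 0) → False) :
    is_valid_map m = is_valid_map_alt m := by
  simp only [is_valid_map, is_valid_map_alt]
  set g := m.map String.toList with hgdef
  by_cases h1 : PySem.Set.len (PySem.Set.ofList ((g.map List.length).map (fun n => (n : Int)))) ≠ 1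
  · rw [if_pos h1, if_pos h1]
  · rw [if_neg h1, if_neg h1]
    rw [not_ne_iff] at h1
    obtain ⟨hlne, hleq⟩ := pvRect_of_len_one h1
    have hgne : g ≠ [] := by
      intro h; rw [h] at hlne; exact hlne rfl
    set W := (g.headD []).length with hWdef
    have hrect : ∀ l ∈ g, l.length = W := by
      intro l hl
      have h2 := hleq l.length (List.mem_map_of_mem (f := List.length) hl)
      rcases g with _ | ⟨l0, rest⟩
      · exact absurd rfl hgne
      · simpa using h2
    have hmne : m ≠ [] := by
      intro h; rw [h] at hgdef; exact hgne (by rw [hgdef]; rfl)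
    have hW : 0 < W := by
      by_contra hcon
      refine hpre ⟨hmne, ?_, ?_⟩
      · intro l hl
        have h2 := hrect l.toList (by rw [hgdef]; exact List.mem_map_of_mem (f := String.toList) hl)
        have h3 : (m.headD "").toList.length = W := by
          rcases m with _ | ⟨s0, ms⟩
          · exact absurd rfl hmne
          · rw [hgdef] at hWdef; simpa using hWdef.symm
        omega
      · have h3 : (m.headD "").toList.length = W := by
          rcases m with _ | ⟨s0, ms⟩
          · exact absurd rfl hmne
          · rw [hgdef] at hWdef; simpa using hWdef.symm
        omega
    have hlne' : ∀ l ∈ g, l ≠ [] := by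
      intro l hl hnil
      have := hrect l hl
      rw [hnil] at this
      simp at this
      omega
    cases hw : pvWallsOk g with
    | false => simp only [Bool.not_false, if_true]
    | true =>
      simp only [Bool.not_true, Bool.false_eq_true, if_false]
      have hone : ∀ l ∈ g, '1' ∈ l := fun l hl => pvWalls_head hw hl (hlne' l hl)
      have hstrip : ∀ l ∈ g, (PySem.Chars.strip l == []) = false :=
        fun l hl => pvStrip_ne (hone l hl)
      have hlead : pvLeadingEmpty g = 0 := by
        rcases hg0 : g with _ | ⟨l0, rest⟩
        · exact absurd hg0 hgne
        · simp only [pvLeadingEmpty, hstrip l0 (by rw [hg0]; exact List.mem_cons_self),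
            Bool.false_eq_true, if_false]
      have hmid : (PySem.List.slice g (some 1) (some (-1))).any
          (fun l => PySem.Chars.strip l == []) = false := by
        rw [List.any_eq_false]
        intro l hl
        rw [hstrip l (pvSlice_sub hl)]
        simp
      rw [hlead, hmid]
      simp only [Nat.lt_irrefl, if_false, Bool.false_eq_true]
      rcases hscan : pvScanRows 0 g (none, none, []) with e | ⟨st, ex, collect⟩
      · rfl
      ·
        rcases st with _ | start
        · rfl
        · rcases ex with _ | exitc
          · rfl
          · by_cases hce : collect.isEmpty = true
            · simp only [hce, if_true]
            · simp only [hce, Bool.false_eq_true, if_false]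
              -- the reachability cores
              have hml : m.length = g.length := by rw [hgdef]; simp
              have hrows : PySem.List.len m = (g.length : Int) := by
                simp [PySem.List.len, hml]
              have hcols : PySem.List.len (g.headD []) = (W : Int) := by
                simp [PySem.List.len, hWdef]
              have hPstart : pvPass g (g.length : Int) (W : Int) start.1 start.2 = true :=
                pvScanRows_P g (g.length : Int) (W : Int) (le_refl _)
                  (fun l hl => by exact_mod_cast (hrect l hl).le) g 0 (none, none, [])
                  (some start, some exitc, collect) (by simp) (by simpa using hscan)
                  (fun s hs => by simp at hs) start rfl
              rw [hrows, hcols]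
              have hdfs := pvDfs_mem g (g.length : Int) (W : Int) start hPstart
              simp only [Int.toNat_natCast] at hdfs
              have hBmem := pvB_mem g W start hrect hPstart
              have hmm : ∀ x, x ∈ pvDfs g (g.length : Int) (W : Int)
                  (5 * g.length * W + 5) [start] [] ↔
                  x ∈ ((pvUnions g (g.length : Int) (W : Int)
                    ((pvCellsRows 0 g).map (fun c => [c])) (pvCellsRows 0 g)).find?
                    (fun s => s.contains start)).getD [] :=
                fun x => (hdfs x).trans (hBmem x).symm
              have hcont : PySem.Set.contains (pvDfs g (g.length : Int) (W : Int)
                  (5 * g.length * W + 5) [start] []) exitc =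
                  (((pvUnions g (g.length : Int) (W : Int)
                    ((pvCellsRows 0 g).map (fun c => [c])) (pvCellsRows 0 g)).find?
                    (fun s => s.contains start)).getD []).contains exitc := by
                rw [Bool.eq_iff_iff, PySem.Set.contains_iff, List.contains_iff_mem]
                exact hmm exitc
              rw [hcont]
              cases hC : (((pvUnions g (g.length : Int) (W : Int)
                  ((pvCellsRows 0 g).map (fun c => [c])) (pvCellsRows 0 g)).find?
                  (fun s => s.contains start)).getD []).contains exitc with
              | false => simp only [Bool.not_false, if_true]
              | true =>
                simp only [Bool.not_true, Bool.false_eq_true, if_false]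
                rw [pvCollectLoop_congr _ _ hmm collect]
                rcases hclv : pvCollectLoop (((pvUnions g (g.length : Int) (W : Int)
                    ((pvCellsRows 0 g).map (fun c => [c])) (pvCellsRows 0 g)).find?
                    (fun s => s.contains start)).getD []) collect with _ | e
                · simp only [hclv]
                  rw [hstrip _ (pvGetLastD_mem hgne)]
                  simp
                · simp only [hclv]

-- ===== VERDICT (by name: the statement is the Claim_ definition above) =====
theorem is_valid_map_spec : Claim_equal_is_valid_map := by
  intro m _ hpre
  unfold Spec_is_valid_map
  exact pvMainEq m hpre
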